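-- pv_equiv track=rewrite | github.com/watcher72/EPAM_HW_Lesson14 | ls.py | columns_vertical
-- ===== SOURCE A (Python) =====
-- from math import ceil
-- from typing import List
--
-- def columns_vertical(files: List[str],
--                        columns: int,
--                        col_width: int) -> List[str]:
--     """
--     Generate the rows of the short info about group of files
--     in multi columns in vertical order.
--
--     :param files: list of names files/directories
--     :param columns: number of columns for output the given list
--     :param col_width: width of each column
--     :return: list of rows for output the short information
--              of given files/directories
--     """
--     temp_info = []
--     total_rows = ceil(len(files) / columns)
--     columns = ceil(len(files) / total_rows)
--     full_rows = (total_rows if len(files) % total_rows == 0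
--                  else len(files) % total_rows)
--     for i in range(full_rows):
--         temp_info.append(' '.join(f'{files[i + j * total_rows]:{col_width}}'
--                                   for j in range(columns)))
--     for i in range(full_rows, total_rows):
--         temp_info.append(' '.join(f'{files[i + j * total_rows]:{col_width}}'
--                                   for j in range(columns - 1)))
--     temp_info.append('\n')
--     return temp_info
-- ===== SOURCE B (Python) =====
-- from math import ceil
-- from typing import List
--
-- def columns_vertical(files: List[str],
--                        columns: int,
--                        col_width: int) -> List[str]:
--     """Same output as A, but built by an explicit column structure:
--     cut the list into consecutive column slices, then transpose row-wise."""
--     total_rows = ceil(len(files) / columns)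
--     columns = ceil(len(files) / total_rows)
--     cols = [files[j * total_rows:(j + 1) * total_rows] for j in range(columns)]
--     rows = [' '.join(f'{col[i]:{col_width}}' for col in cols if len(col) > i)
--             for i in range(total_rows)]
--     rows.append('\n')
--     return rows
-- ===== Notes on version B (the rewrite author's own statement) =====
-- stated objective: alternative
-- what changed: B replaces A's flat index arithmetic over two separate row loops with an explicit column structure: it cuts the file list into consecutive column slices and transposes them row-wise, each row joining the columns that are tall enough.
import Mathlib
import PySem

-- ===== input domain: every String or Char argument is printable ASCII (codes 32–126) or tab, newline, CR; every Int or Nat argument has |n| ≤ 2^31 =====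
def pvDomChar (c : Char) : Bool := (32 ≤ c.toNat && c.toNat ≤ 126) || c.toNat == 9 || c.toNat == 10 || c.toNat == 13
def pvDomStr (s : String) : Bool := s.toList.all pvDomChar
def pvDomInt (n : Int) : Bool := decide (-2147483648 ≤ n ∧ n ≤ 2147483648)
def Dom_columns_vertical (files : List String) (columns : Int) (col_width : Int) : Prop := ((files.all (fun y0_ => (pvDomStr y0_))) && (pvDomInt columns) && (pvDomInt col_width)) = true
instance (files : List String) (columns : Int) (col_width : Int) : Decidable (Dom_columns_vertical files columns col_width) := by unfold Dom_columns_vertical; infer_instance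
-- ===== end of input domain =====

-- B builds the explicit column slices and transposes them row-wise instead of A's flat index
-- arithmetic over two row loops (objective: alternative decomposition, same cost).

-- ceil(len/x) on the admitted inputs (list lengths and the divisors derived from them are far below
-- 2^53, where Python's float division is exact enough for the ceiling): ⌈a/b⌉ = -((-a)//b)
def pyCeilDiv (a b : Int) : Int := -(PySem.Int.floordiv (-a) b)

-- f'{s:{w}}' for a string s and 0 ≤ w (Pre_ excludes negative widths, where Python raises ValueError)
def pyFmtWidth (s : String) (w : Int) : String :=
  String.ofList (s.toList ++ List.replicate (w.toNat - s.toList.length) ' ')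

-- ===== PORT A =====
def columns_vertical (files : List String) (columns : Int) (col_width : Int) : List String :=
  let n : Int := files.length
  let total_rows := pyCeilDiv n columns
  let columns2 := pyCeilDiv n total_rows          -- Python rebinds 'columns'
  let full_rows := if PySem.Int.mod n total_rows = 0 then total_rows else PySem.Int.mod n total_rows
  -- files[i + j*total_rows]: in range on every input Pre_ admits, so pyGetD's default is never used
  let loop1 := (PySem.List.pyRange 0 full_rows 1).foldl (fun acc i =>
      acc ++ [PySem.Str.join " " ((PySem.List.pyRange 0 columns2 1).map (fun j =>
        pyFmtWidth (PySem.List.pyGetD files (i + j * total_rows) "") col_width))]) []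
  let loop2 := (PySem.List.pyRange full_rows total_rows 1).foldl (fun acc i =>
      acc ++ [PySem.Str.join " " ((PySem.List.pyRange 0 (columns2 - 1) 1).map (fun j =>
        pyFmtWidth (PySem.List.pyGetD files (i + j * total_rows) "") col_width))]) loop1
  loop2 ++ ["\n"]

-- ===== PORT B =====
def columns_vertical_alt (files : List String) (columns : Int) (col_width : Int) : List String :=
  let n : Int := files.length
  let total_rows := pyCeilDiv n columns
  let columns2 := pyCeilDiv n total_rows
  let cols := (PySem.List.pyRange 0 columns2 1).map (fun j =>
      PySem.List.slice files (some (j * total_rows)) (some ((j + 1) * total_rows)))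
  let rows := (PySem.List.pyRange 0 total_rows 1).map (fun i =>
      PySem.Str.join " " (((cols.filter (fun col => decide (i < (col.length : Int)))).map (fun col =>
        pyFmtWidth (PySem.List.pyGetD col i "") col_width))))
  rows ++ ["\n"]

-- ===== PRECONDITION & SPEC =====
-- Pre_ excludes exactly the inputs where the Python A raises: empty files or columns = 0
-- (ZeroDivisionError in one of the two ceil divisions), a negative columns whose magnitude exceeds
-- len(files) (the second ceil divides by the zero total_rows), and a negative col_width when a row
-- is actually formatted, i.e. when columns > 0 (ValueError: 'Sign not allowed in string format
-- specifier'; with columns < 0 both loops are empty and no format runs).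
def Pre_columns_vertical (files : List String) (columns : Int) (col_width : Int) : Prop :=
  files ≠ [] ∧ columns ≠ 0 ∧ (0 < columns → 0 ≤ col_width) ∧ (0 < columns ∨ -columns ≤ (files.length : Int))
instance (files : List String) (columns : Int) (col_width : Int) : Decidable (Pre_columns_vertical files columns col_width) := by unfold Pre_columns_vertical; infer_instance
def pvWitness_columns_vertical : List String × Int × Int := (["a", "bb", "ccc", "d", "e"], 2, 4)

def Spec_columns_vertical (files : List String) (columns : Int) (col_width : Int) (out : List String) : Prop := out = columns_vertical_alt files columns col_width
instance (files : List String) (columns : Int) (col_width : Int) (out : List String) : Decidable (Spec_columns_vertical files columns col_width out) := by unfold Spec_columns_vertical; infer_instance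

-- ===== CLAIM (what is proved, stated in full; the proofs are below) =====
def Claim_equal_columns_vertical : Prop := ∀ (files : List String) (columns : Int) (col_width : Int), Dom_columns_vertical files columns col_width → Pre_columns_vertical files columns col_width → Spec_columns_vertical files columns col_width (columns_vertical files columns col_width)

-- ===== LEMMAS AND PROOFS =====

-- the column slice j of B, as drop/take
lemma pv_slice_eq (files : List String) {T j : Int} (hT : 0 ≤ T) (hj : 0 ≤ j) :
    PySem.List.slice files (some (j * T)) (some ((j + 1) * T))
      = List.take T.toNat (List.drop (j * T).toNat files) := by
  have ha : 0 ≤ j * T := mul_nonneg hj hT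
  have hb : 0 ≤ (j + 1) * T := mul_nonneg (by omega) hT
  rw [PySem.List.slice_toNat files ha hb]
  have hsplit : (j + 1) * T = j * T + T := by ring
  rw [hsplit]
  congr 1
  omega

-- reading row i out of column j equals A's flat index
lemma pv_col_get (files : List String) {T j i : Int} (hT : 0 ≤ T) (hj : 0 ≤ j)
    (hi : 0 ≤ i) (hiT : i < T) :
    PySem.List.pyGetD (PySem.List.slice files (some (j * T)) (some ((j + 1) * T))) i ""
      = PySem.List.pyGetD files (i + j * T) "" := by
  have ha : 0 ≤ j * T := mul_nonneg hj hT
  rw [pv_slice_eq files hT hj]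
  rw [PySem.List.pyGetD_of_nonneg _ _ hi, PySem.List.pyGetD_of_nonneg _ _ (by omega)]
  rw [List.getD_eq_getElem?_getD, List.getD_eq_getElem?_getD, List.getElem?_take,
    List.getElem?_drop]
  rw [if_pos (by omega)]
  have hidx : (j * T).toNat + i.toNat = (i + j * T).toNat := by omega
  rw [hidx]

-- ===== VERDICT (by name: the statement is the Claim_ definition above) =====
theorem columns_vertical_spec : Claim_equal_columns_vertical := by
  intro files columns col_width _hdom hpre
  obtain ⟨hne, hc0, _hw, hcase⟩ := hpre
  unfold Spec_columns_vertical
  simp only [columns_vertical, columns_vertical_alt]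
  have hn1 : 1 ≤ (files.length : Int) := by
    have : files.length ≠ 0 := fun h => hne (List.length_eq_zero_iff.mp h)
    omega
  set n : Int := (files.length : Int) with hndef
  set T : Int := pyCeilDiv n columns with hTdef
  rcases lt_or_gt_of_ne hc0 with hneg | hpos
  · -- columns < 0 : all ranges are empty, both sides are ["\n"]
    have hnc : -columns ≤ n := by rcases hcase with h | h; omega; exact h
    have hT1 : T ≤ -1 := by
      have h1 : PySem.Int.floordiv (-n) columns = PySem.Int.floordiv n (-columns) := by
        conv_lhs => rw [show columns = -(-columns) by ring]
        exact PySem.Int.floordiv_neg_neg n (-columns)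
      have h2 : 1 ≤ PySem.Int.floordiv n (-columns) :=
        (PySem.Int.le_floordiv_iff_mul_le (by omega)).mpr (by omega)
      rw [hTdef]; unfold pyCeilDiv; omega
    have hmb := PySem.Int.mod_neg_bounds n (show T < 0 by omega)
    set F : Int := if PySem.Int.mod n T = 0 then T else PySem.Int.mod n T with hFdef
    have hF0 : F ≤ 0 := by rw [hFdef]; split_ifs <;> omega
    have hTF : T ≤ F := by rw [hFdef]; split_ifs <;> omega
    rw [PySem.List.pyRange_one_eq_nil hF0, PySem.List.pyRange_one_eq_nil hTF,
      PySem.List.pyRange_one_eq_nil (show T ≤ 0 by omega)]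
    simp
  · -- columns > 0 : the real case
    have hbrT : (T - 1) * columns < n ∧ n ≤ T * columns :=
      (PySem.Int.neg_floordiv_neg_eq_iff_of_pos hpos).mp (by rw [hTdef]; rfl)
    have hT1 : 1 ≤ T := by nlinarith [hbrT.2]
    have hT0 : (0 : Int) ≤ T := by omega
    set C : Int := pyCeilDiv n T with hCdef
    have hbrC : (C - 1) * T < n ∧ n ≤ C * T :=
      (PySem.Int.neg_floordiv_neg_eq_iff_of_pos (by omega)).mp (by rw [hCdef]; rfl)
    have hC1 : 1 ≤ C := by nlinarith [hbrC.2]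
    have hm0 : 0 ≤ PySem.Int.mod n T := PySem.Int.mod_nonneg n (by omega)
    have hmlt : PySem.Int.mod n T < T := PySem.Int.mod_lt n (by omega)
    have hsum : PySem.Int.floordiv n T * T + PySem.Int.mod n T = n :=
      PySem.Int.floordiv_mul_add_mod n T
    set F : Int := if PySem.Int.mod n T = 0 then T else PySem.Int.mod n T with hFdef
    set q : Int := PySem.Int.floordiv n T with hqdef
    have hkey : n = (C - 1) * T + F ∧ 1 ≤ F ∧ F ≤ T := by
      by_cases hM : PySem.Int.mod n T = 0
      · have hF : F = T := by rw [hFdef, if_pos hM]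
        have hnq : n = q * T := by omega
        have h1 : C - 1 < q := lt_of_mul_lt_mul_right (show (C - 1) * T < q * T by omega) hT0
        have h2 : q ≤ C := le_of_mul_le_mul_right (show q * T ≤ C * T by omega) (by omega)
        have hCeq : C = q := by omega
        refine ⟨by rw [hF]; linear_combination hnq - T * hCeq, by omega, by omega⟩
      · have hF : F = PySem.Int.mod n T := by rw [hFdef, if_neg hM]
        have hexp : (q + 1) * T = q * T + T := by ring
        have h1 : C - 1 < q + 1 := lt_of_mul_lt_mul_right (show (C - 1) * T < (q + 1) * T by omega) hT0
        have h2 : q < C := lt_of_mul_lt_mul_right (show q * T < C * T by omega) hT0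
        have hCq : C = q + 1 := by omega
        refine ⟨by rw [hF]; linear_combination -hsum - T * hCq, by omega, by omega⟩
    obtain ⟨hsumCT, hF1, hFT⟩ := hkey
    -- length of column slice j
    have hlen : ∀ j : Int, 0 ≤ j → j < C →
        ((PySem.List.slice files (some (j * T)) (some ((j + 1) * T))).length : Int)
          = if j < C - 1 then T else F := by
      intro j hj hjC
      rw [pv_slice_eq files hT0 hj]
      have ha : 0 ≤ j * T := mul_nonneg hj hT0
      have hub : j * T ≤ (C - 1) * T := mul_le_mul_of_nonneg_right (by omega) hT0
      rw [List.length_take, List.length_drop]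
      split_ifs with hlt
      · have hub2 : j * T ≤ (C - 2) * T := mul_le_mul_of_nonneg_right (by omega) hT0
        have : (C - 2) * T = (C - 1) * T - T := by ring
        omega
      · have hge : (C - 1) * T ≤ j * T := mul_le_mul_of_nonneg_right (by omega) hT0
        omega
    -- unfold the two A-loops into maps
    rw [PySem.List.foldl_append_singleton_eq_map, PySem.List.foldl_append_singleton_eq_map]
    rw [PySem.List.pyRange_one_append 0 F T (by omega) (by omega), List.map_append]
    simp only [List.nil_append, List.append_assoc]
    congr 1
    · -- full rows: every column is tall enough, the filter keeps all of them
      apply List.map_congr_left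
      intro i hi
      have hi' := PySem.List.mem_pyRange_one.mp hi
      congr 1
      rw [List.filter_eq_self.mpr]
      · rw [List.map_map]
        apply List.map_congr_left
        intro j hj
        have hj' := PySem.List.mem_pyRange_one.mp hj
        simp only [Function.comp]
        rw [pv_col_get files hT0 hj'.1 hi'.1 (by omega)]
      · intro col hcol
        obtain ⟨j, hj, rfl⟩ := List.mem_map.mp hcol
        have hj' := PySem.List.mem_pyRange_one.mp hj
        have := hlen j hj'.1 hj'.2
        rw [decide_eq_true_eq]
        split_ifs at this <;> omega
    · congr 1
      -- short rows: the filter drops exactly the last column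
      apply List.map_congr_left
      intro i hi
      have hi' := PySem.List.mem_pyRange_one.mp hi
      congr 1
      rw [PySem.List.pyRange_one_append 0 (C - 1) C (by omega) (by omega), List.map_append,
        List.filter_append]
      rw [PySem.List.pyRange_one_cons (show C - 1 < C by omega),
        PySem.List.pyRange_one_eq_nil (show C ≤ C - 1 + 1 by omega)]
      have hlast : ((PySem.List.slice files (some ((C - 1) * T)) (some ((C - 1 + 1) * T))).length : Int) = F := by
        have := hlen (C - 1) (by omega) (by omega)
        rw [if_neg (by omega)] at this
        exact this
      rw [show ([C - 1] : List Int).map (fun j => PySem.List.slice files (some (j * T)) (some ((j + 1) * T))) = [PySem.List.slice files (some ((C - 1) * T)) (some ((C - 1 + 1) * T))] from rfl]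
      rw [List.filter_singleton]
      rw [show (decide (i < ((PySem.List.slice files (some ((C - 1) * T)) (some ((C - 1 + 1) * T))).length : Int))) = false from by rw [hlast]; exact decide_eq_false (by omega)]
      rw [cond_false]
      rw [List.filter_eq_self.mpr]
      · rw [List.append_nil, List.map_map]
        apply List.map_congr_left
        intro j hj
        have hj' := PySem.List.mem_pyRange_one.mp hj
        simp only [Function.comp]
        rw [pv_col_get files hT0 hj'.1 (by omega) (by omega)]
      · intro col hcol
        obtain ⟨j, hj, rfl⟩ := List.mem_map.mp hcol
        have hj' := PySem.List.mem_pyRange_one.mp hj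
        have := hlen j hj'.1 (by omega)
        rw [if_pos (by omega)] at this
        rw [decide_eq_true_eq]
        omega
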